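-- pv_equiv track=rewrite | github.com/dltmdan92/pythonalgorithm | GreedyAlgorithm/MinFee.py | min_fee
-- ===== SOURCE A (Python) =====
-- def min_fee(pages_to_print):
--     # 코드를 작성하세요.
--     i = 1
--     while i < len(pages_to_print):
--         j = i
--         while j > 0:
--             if pages_to_print[j] < pages_to_print[j - 1]:
--                 temp = pages_to_print[j]
--                 pages_to_print[j] = pages_to_print[j - 1]
--                 pages_to_print[j - 1] = temp
--             j -= 1
--         i += 1
--     sum = 0
--     for x in range(0, len(pages_to_print)):
--         sum += (len(pages_to_print) - x) * pages_to_print[x]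
--     return sum
-- ===== SOURCE B (Python) =====
-- def min_fee(pages_to_print):
--     # sort-free: total fee = sum(all) + sum of min over every unordered pair
--     # (each pair (i,j) in the sorted order contributes the smaller page count
--     # once for every later position; does not mutate the argument, unlike A)
--     total = sum(pages_to_print)
--     rest = pages_to_print
--     while rest:
--         head = rest[0]
--         rest = rest[1:]
--         for b in rest:
--             total += min(head, b)
--     return total
-- ===== Notes on version B (the rewrite author's own statement) =====
-- stated objective: alternative
-- what changed: Drops sorting entirely: uses the identity that the weighted sum over the sorted list equals sum(list) plus the sum of min(a,b) over all unordered pairs, computed by a pairwise pass; return value only (A sorts its argument in place, B does not mutate it).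
import Mathlib
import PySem

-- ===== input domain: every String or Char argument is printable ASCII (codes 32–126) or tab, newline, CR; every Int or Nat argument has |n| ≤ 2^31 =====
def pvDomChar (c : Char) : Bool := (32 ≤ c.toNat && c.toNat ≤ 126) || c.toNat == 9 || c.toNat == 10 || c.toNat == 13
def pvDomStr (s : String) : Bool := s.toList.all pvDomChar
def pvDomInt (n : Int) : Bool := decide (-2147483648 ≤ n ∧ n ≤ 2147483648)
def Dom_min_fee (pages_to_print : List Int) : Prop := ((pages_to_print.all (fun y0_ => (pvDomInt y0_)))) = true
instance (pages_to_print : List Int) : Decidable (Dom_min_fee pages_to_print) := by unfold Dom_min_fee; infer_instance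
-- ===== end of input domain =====

-- B drops the sort entirely: total fee = sum(list) + Σ min(a,b) over all unordered pairs
-- (a permutation-invariant closed form of A's sorted weighted sum); return value only —
-- A sorts its argument in place, B does not mutate it.

-- ===== PORT A =====
-- inner 'while j > 0' loop of A; the Nat argument is Python's j (indices are in range
-- whenever the loop runs, so the getD/set transliteration is exact there)
def pvInnerA (l : List Int) : Nat → List Int
  | 0 => l
  | j + 1 =>
    let l' := if l.getD (j + 1) 0 < l.getD j 0 then
        (l.set (j + 1) (l.getD j 0)).set j (l.getD (j + 1) 0)
      else l
    pvInnerA l' j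

theorem pvInnerA_length (j : Nat) (l : List Int) : (pvInnerA l j).length = l.length := by
  induction j generalizing l with
  | zero => rfl
  | succ j ih => simp only [pvInnerA]; rw [ih]; split <;> simp

-- outer 'while i < len(pages_to_print)' loop of A
def pvOuterA (l : List Int) (i : Nat) : List Int :=
  if i < l.length then pvOuterA (pvInnerA l i) (i + 1) else l
termination_by l.length - i
decreasing_by rw [pvInnerA_length]; omega

def min_fee (pages_to_print : List Int) : Int :=
  let s := pvOuterA pages_to_print 1
  (List.range s.length).foldl
    (fun (acc : Int) (x : Nat) => acc + ((s.length : Int) - (x : Int)) * s.getD x 0) 0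

-- ===== PORT B =====
-- 'while rest:' loop of Source B: peel the head, add min(head, b) for every later b
def pvLoopB : List Int → Int → Int
  | [], total => total
  | a :: t, total => pvLoopB t (t.foldl (fun acc b => acc + min a b) total)

def min_fee_alt (pages_to_print : List Int) : Int :=
  pvLoopB pages_to_print pages_to_print.sum

-- ===== PRECONDITION & SPEC =====
def Spec_min_fee (pages_to_print : List Int) (out : Int) : Prop := out = min_fee_alt pages_to_print
instance (pages_to_print : List Int) (out : Int) : Decidable (Spec_min_fee pages_to_print out) := by unfold Spec_min_fee; infer_instance

-- ===== CLAIM (what is proved, stated in full; the proofs are below) =====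
def Claim_equal_min_fee : Prop := ∀ (pages_to_print : List Int), Dom_min_fee pages_to_print → Spec_min_fee pages_to_print (min_fee pages_to_print)

-- ===== LEMMAS AND PROOFS =====

-- insertion placing equal elements AFTER existing ones (A swaps only on strict <)
def pvIns (a : Int) : List Int → List Int
  | [] => [a]
  | b :: p => if a < b then a :: b :: p else b :: pvIns a p

theorem pvIns_perm (a : Int) (p : List Int) : (pvIns a p).Perm (a :: p) := by
  induction p with
  | nil => simp [pvIns]
  | cons b p ih =>
    simp only [pvIns]; split
    · exact List.Perm.refl _
    · exact (ih.cons b).trans (List.Perm.swap a b p)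

theorem pvIns_pairwise (a : Int) (p : List Int) (h : p.Pairwise (· ≤ ·)) :
    (pvIns a p).Pairwise (· ≤ ·) := by
  induction p with
  | nil => simp [pvIns]
  | cons b p ih =>
    rcases List.pairwise_cons.mp h with ⟨hb, hp⟩
    simp only [pvIns]; split
    · rename_i hab
      refine List.pairwise_cons.mpr ⟨?_, h⟩
      intro y hy
      rcases List.mem_cons.mp hy with rfl | hy
      · omega
      · exact le_trans (le_of_lt hab) (hb y hy)
    · rename_i hab
      refine List.pairwise_cons.mpr ⟨?_, ih hp⟩
      intro y hy
      rcases List.mem_cons.mp ((pvIns_perm a p).mem_iff.mp hy) with rfl | hy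
      · omega
      · exact hb y hy

theorem pvIns_length (a : Int) (p : List Int) : (pvIns a p).length = p.length + 1 :=
  (pvIns_perm a p).length_eq

theorem pvIns_append_of_lt (a b : Int) (q : List Int) (h : a < b) :
    pvIns a (q ++ [b]) = pvIns a q ++ [b] := by
  induction q with
  | nil => simp [pvIns, h]
  | cons c q ih =>
    simp only [List.cons_append, pvIns]
    split <;> simp [ih]

theorem pvIns_eq_append (a : Int) (p : List Int) (h : ∀ x ∈ p, ¬ a < x) :
    pvIns a p = p ++ [a] := by
  induction p with
  | nil => rfl
  | cons b p ih =>
    simp only [pvIns, if_neg (h b (by simp))]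
    rw [ih (fun x hx => h x (by simp [hx]))]; rfl

-- a pass of the inner loop over an already-sorted prefix makes no swap
theorem pvInnerA_noswap (j : Nat) (p r : List Int) (hs : p.Pairwise (· ≤ ·))
    (hj : j < p.length) : pvInnerA (p ++ r) j = p ++ r := by
  induction j with
  | zero => rfl
  | succ j ih =>
    have h1 : (p ++ r).getD (j + 1) 0 = p.getD (j + 1) 0 := by
      rw [List.getD_eq_getElem?_getD, List.getD_eq_getElem?_getD,
        List.getElem?_append_left hj]
    have h0 : (p ++ r).getD j 0 = p.getD j 0 := by
      rw [List.getD_eq_getElem?_getD, List.getD_eq_getElem?_getD,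
        List.getElem?_append_left (by omega)]
    have hle : p.getD j 0 ≤ p.getD (j + 1) 0 := by
      have := List.pairwise_iff_getElem.mp hs j (j + 1) (by omega) hj (by omega)
      rw [List.getD_eq_getElem?_getD, List.getD_eq_getElem?_getD,
        List.getElem?_eq_getElem hj, List.getElem?_eq_getElem (show j < p.length by omega)]
      simpa using this
    simp only [pvInnerA, h1, h0, if_neg (not_lt.mpr hle)]
    exact ih (by omega)

-- one inner pass inserts the element at position p.length into the sorted prefix p
theorem pvInnerA_spec (p : List Int) (hs : p.Pairwise (· ≤ ·)) (a : Int) (r : List Int) :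
    pvInnerA (p ++ a :: r) p.length = pvIns a p ++ r := by
  induction p using List.reverseRecOn generalizing a r with
  | nil => simp [pvInnerA, pvIns]
  | append_singleton q b ih =>
    have hq : q.Pairwise (· ≤ ·) := (List.pairwise_append.mp hs).1
    have hqb : ∀ x ∈ q, x ≤ b := by
      intro x hx
      exact (List.pairwise_append.mp hs).2.2 x hx b (by simp)
    have hlen : (q ++ [b]).length = q.length + 1 := by simp
    have hL : q ++ [b] ++ a :: r = q ++ b :: a :: r := by simp
    have hga : (q ++ b :: a :: r).getD (q.length + 1) 0 = a := by
      rw [List.getD_eq_getElem?_getD, List.getElem?_append_right (by omega)]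
      simp
    have hgb : (q ++ b :: a :: r).getD q.length 0 = b := by
      rw [List.getD_eq_getElem?_getD, List.getElem?_append_right (by omega)]
      simp
    rw [hL, hlen]
    simp only [pvInnerA, hga, hgb]
    by_cases hab : a < b
    · rw [if_pos hab]
      have hset : ((q ++ b :: a :: r).set (q.length + 1) b).set q.length a
          = q ++ a :: b :: r := by
        rw [List.set_append_right _ _ (by omega), List.set_append_right _ _ (by omega)]
        simp
      rw [hset, ih hq a (b :: r), pvIns_append_of_lt a b q hab]
      simp
    · rw [if_neg hab]
      have hnos : pvInnerA ((q ++ [b]) ++ a :: r) q.length = (q ++ [b]) ++ a :: r :=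
        pvInnerA_noswap q.length (q ++ [b]) (a :: r) hs (by simp)
      rw [hL] at hnos
      rw [hnos, pvIns_eq_append a (q ++ [b]) ?_]
      · simp
      · intro x hx
        rcases List.mem_append.mp hx with hx | hx
        · exact not_lt.mpr (le_trans (hqb x hx) (not_lt.mp hab))
        · simp at hx; omega

-- the outer loop, started with a sorted prefix p, folds pvIns over the rest
theorem pvOuterA_spec (r p : List Int) (hs : p.Pairwise (· ≤ ·)) :
    pvOuterA (p ++ r) p.length = r.foldl (fun acc a => pvIns a acc) p := by
  induction r generalizing p with
  | nil =>
    rw [pvOuterA]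
    simp
  | cons a r ih =>
    rw [pvOuterA, if_pos (by simp)]
    rw [pvInnerA_spec p hs a r]
    have := ih (pvIns a p) (pvIns_pairwise a p hs)
    rw [pvIns_length] at this
    simpa using this

theorem foldl_pvIns_pairwise (l p : List Int) (hs : p.Pairwise (· ≤ ·)) :
    (l.foldl (fun acc a => pvIns a acc) p).Pairwise (· ≤ ·) := by
  induction l generalizing p with
  | nil => exact hs
  | cons a l ih => exact ih _ (pvIns_pairwise a p hs)

theorem foldl_pvIns_perm (l p : List Int) :
    (l.foldl (fun acc a => pvIns a acc) p).Perm (p ++ l) := by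
  induction l generalizing p with
  | nil => simp
  | cons a l ih =>
    refine (ih (pvIns a p)).trans ?_
    exact ((pvIns_perm a p).append_right l).trans List.perm_middle.symm

-- the whole of A's sort equals the pvIns fold from the empty accumulator
theorem pvOuterA_one (l : List Int) :
    pvOuterA l 1 = l.foldl (fun acc a => pvIns a acc) [] := by
  cases l with
  | nil => rw [pvOuterA]; simp
  | cons b t =>
    have h := pvOuterA_spec t [b] (by simp)
    simpa [pvIns] using h

-- A's summation loop: sum of (length-of-suffix-from-here) * element
def pvW : List Int → Int
  | [] => 0
  | a :: s => ((s.length : Int) + 1) * a + pvW s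

theorem pvSumA (s : List Int) (c : Int) :
    (List.range s.length).foldl
      (fun (acc : Int) (x : Nat) => acc + ((s.length : Int) - (x : Int)) * s.getD x 0) c = c + pvW s := by
  induction s generalizing c with
  | nil => simp [pvW]
  | cons a s ih =>
    rw [List.length_cons, List.range_succ_eq_map, List.foldl_cons, List.foldl_map]
    have hext : ∀ (acc : Int), ∀ x ∈ List.range s.length,
        acc + (((s.length + 1 : Nat) : Int) - ((x.succ : Nat) : Int)) * (a :: s).getD x.succ 0
          = acc + ((s.length : Int) - (x : Int)) * s.getD x 0 := by
      intro acc x _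
      simp only [List.getD_cons_succ]
      push_cast; ring
    rw [List.foldl_ext _ _ _ hext, ih]
    simp only [pvW, List.getD_cons_zero]
    push_cast; ring

-- B's pairwise quantity: Σ min(a,b) over all unordered pairs, head-first
def pvP : List Int → Int
  | [] => 0
  | a :: t => (t.map (fun b => min a b)).sum + pvP t

theorem pvFoldMin (a : Int) (t : List Int) (c : Int) :
    t.foldl (fun acc b => acc + min a b) c = c + (t.map (fun b => min a b)).sum := by
  induction t generalizing c with
  | nil => simp
  | cons b t ih => rw [List.foldl_cons, ih]; simp; ring

theorem pvLoopB_eq (l : List Int) (c : Int) : pvLoopB l c = c + pvP l := by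
  induction l generalizing c with
  | nil => simp [pvLoopB, pvP]
  | cons a t ih => rw [pvLoopB, ih, pvFoldMin, pvP]; ring

-- pvP is invariant under permutation of the list
theorem pvP_perm {l l' : List Int} (h : l.Perm l') : pvP l = pvP l' := by
  induction h with
  | nil => rfl
  | cons a h ih =>
    rename_i t t'
    simp only [pvP, ih, (h.map (fun b => min a b)).sum_eq]
  | swap a b t =>
    simp only [pvP, List.map_cons, List.sum_cons, min_comm a b]
    ring
  | trans _ _ ih1 ih2 => exact ih1.trans ih2

theorem pvSumConst (a : Int) (t : List Int) : (t.map (fun _ => a)).sum = (t.length : Int) * a := by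
  induction t with
  | nil => simp
  | cons b t ihc => simp only [List.map_cons, List.sum_cons, ihc, List.length_cons]; push_cast; ring

-- on a sorted list, A's weighted sum equals sum + pairwise mins
theorem pvW_sorted (s : List Int) (hs : s.Pairwise (· ≤ ·)) :
    pvW s = s.sum + pvP s := by
  induction s with
  | nil => simp [pvW, pvP]
  | cons a t ih =>
    rcases List.pairwise_cons.mp hs with ⟨ha, ht⟩
    have hmap : t.map (fun b => min a b) = t.map (fun _ => a) :=
      List.map_congr_left (fun b hb => min_eq_left (ha b hb))
    simp only [pvW, pvP, List.sum_cons, ih ht, hmap, pvSumConst]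
    ring

-- ===== VERDICT (by name: the statement is the Claim_ definition above) =====
theorem min_fee_spec : Claim_equal_min_fee := by
  intro l _
  unfold Spec_min_fee
  simp only [min_fee, min_fee_alt]
  rw [pvOuterA_one, pvSumA, pvLoopB_eq]
  have hperm : (l.foldl (fun acc a => pvIns a acc) []).Perm l := by
    simpa using foldl_pvIns_perm l []
  rw [pvW_sorted _ (foldl_pvIns_pairwise l [] (by simp)), hperm.sum_eq, pvP_perm hperm]
  ring
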